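-- pv_equiv track=rewrite | github.com/kermitnirmit/Advent-of-Code-2016 | day_16/solution.py | produce_sum
-- ===== SOURCE A (Python) =====
-- def produce_sum(s):
--     ret = ""
--     for i in range(0, len(s), 2):
--         left, right = s[i], s[i+1]
--         if left == right:
--             ret += "1"
--         else:
--             ret += "0"
--     if len(ret) % 2 != 0:
--         return ret
--     else:
--         return produce_sum(ret)
-- ===== SOURCE B (Python) =====
-- def produce_sum(s):
--     while len(s) % 2 == 0:
--         s = ''.join('1' if a == b else '0' for a, b in zip(s[::2], s[1::2]))
--     return s
-- ===== Notes on version B (the rewrite author's own statement) =====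
-- stated objective: simpler
-- what changed: Replaced the tail recursion and index-based pairing loop with a plain while loop that pairs adjacent bits by zipping the even- and odd-index slices.
-- crash fix: On odd-length input A raises IndexError at s[i+1]; B's while-condition is false immediately and it returns s unchanged. — e.g. on produce_sum("abc"): A raises IndexError, B returns "abc"
import Mathlib
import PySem

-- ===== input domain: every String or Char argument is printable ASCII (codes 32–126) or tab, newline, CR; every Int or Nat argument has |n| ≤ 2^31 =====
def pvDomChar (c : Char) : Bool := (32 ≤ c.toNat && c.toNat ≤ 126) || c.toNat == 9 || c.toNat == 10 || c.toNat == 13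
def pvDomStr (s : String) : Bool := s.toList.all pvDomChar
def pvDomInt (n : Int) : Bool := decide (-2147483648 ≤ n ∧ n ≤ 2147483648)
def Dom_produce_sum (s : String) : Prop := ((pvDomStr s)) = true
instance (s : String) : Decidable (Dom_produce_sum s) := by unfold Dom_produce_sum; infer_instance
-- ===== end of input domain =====

-- B replaces A's tail recursion + index-pairing loop by a while loop pairing zipped slices (objective: simpler).

-- ===== PORT A =====
-- A's inner loop: for i in range(0,len(s),2): take s[i], s[i+1], emit '1' iff equal.
-- Transcribed as structural recursion two characters at a time; the odd one-char
-- tail (where Python raises IndexError, excluded by Pre_) yields [].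
def pairA : List Char → List Char
  | a :: b :: rest => (if a = b then '1' else '0') :: pairA rest
  | _ => []

-- termination lemma for goA/goB below
theorem pairA_length : ∀ l : List Char, (pairA l).length = l.length / 2
  | [] => by simp [pairA]
  | [_] => by simp [pairA]
  | a :: b :: rest => by
      simp only [pairA, List.length_cons, pairA_length rest]; omega

-- A's recursion: ret := pairing of s; return ret if odd length, else recurse.
-- The 'l = []' guard only provides totality: Python recurses forever on "".
def goA (l : List Char) : List Char :=
  if h : l = [] then []
  else
    let ret := pairA l
    if ret.length % 2 ≠ 0 then ret else goA ret
termination_by l.length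
decreasing_by
  have h1 := pairA_length l
  have h2 : l.length ≠ 0 := fun hh => h (List.length_eq_zero_iff.mp hh)
  omega

def produce_sum (s : String) : String := String.mk (goA s.toList)

-- ===== PORT B =====
-- s[::2] / s[1::2]: step-2 slices, not covered by PySem; ported by hand, exact:
-- every element at an even index of the given list, in order.
def everyOther : List Char → List Char
  | a :: _ :: rest => a :: everyOther rest
  | l => l

-- one body of B's while loop: zip the two slices, map the XNOR bit
def pairB (l : List Char) : List Char :=
  ((everyOther l).zip (everyOther l.tail)).map (fun p => if p.1 = p.2 then '1' else '0')

-- termination lemma for goB (the loop state shrinks); also the key agreement fact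
theorem everyOther_cons (b : Char) (rest : List Char) :
    everyOther (b :: rest) = b :: everyOther rest.tail := by
  cases rest <;> simp [everyOther]

theorem pairB_eq_pairA : ∀ l : List Char, pairB l = pairA l
  | [] => by simp [pairA, pairB, everyOther]
  | [_] => by simp [pairA, pairB, everyOther]
  | a :: b :: rest => by
      simp only [pairA, pairB, everyOther, List.tail_cons, everyOther_cons,
        List.zip_cons_cons, List.map_cons]
      exact congrArg _ (pairB_eq_pairA rest)

-- B's while loop: while len(s) % 2 == 0, s := paired s; the 'l = []' guard only
-- provides totality (Python's while loop never exits on "").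
def goB (l : List Char) : List Char :=
  if h : l = [] then []
  else if l.length % 2 = 0 then goB (pairB l) else l
termination_by l.length
decreasing_by
  rw [pairB_eq_pairA]
  have h1 := pairA_length l
  have h2 : l.length ≠ 0 := fun hh => h (List.length_eq_zero_iff.mp hh)
  omega

def produce_sum_alt (s : String) : String := String.mk (goB s.toList)

-- ===== PRECONDITION & SPEC =====
-- Pre_ excludes exactly the inputs where A raises or never returns: odd length
-- (IndexError at s[i+1]) and the empty string (infinite recursion).
def Pre_produce_sum (s : String) : Prop := 0 < s.length ∧ s.length % 2 = 0
instance (s : String) : Decidable (Pre_produce_sum s) := by unfold Pre_produce_sum; infer_instance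
def pvWitness_produce_sum : String := "1001"

-- On odd-length input A raises IndexError at s[i+1]; B returns s unchanged.
def Raises_produce_sum (s : String) : Prop := s.length % 2 = 1
instance (s : String) : Decidable (Raises_produce_sum s) := by unfold Raises_produce_sum; infer_instance
def pvRaiseWitness_produce_sum : String := "abc"
def pvRaiseWitnessOut_produce_sum : String := "abc"

def Spec_produce_sum (s : String) (out : String) : Prop := out = produce_sum_alt s
instance (s : String) (out : String) : Decidable (Spec_produce_sum s out) := by unfold Spec_produce_sum; infer_instance

-- ===== CLAIM (what is proved, stated in full; the proofs are below) =====
def Claim_equal_produce_sum : Prop := ∀ (s : String), Dom_produce_sum s → Pre_produce_sum s → Spec_produce_sum s (produce_sum s)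
def Claim_raises_produce_sum : Prop := (∀ (s : String), Dom_produce_sum s → Raises_produce_sum s → ¬ Pre_produce_sum s) ∧ (Dom_produce_sum (pvRaiseWitness_produce_sum) ∧ Raises_produce_sum (pvRaiseWitness_produce_sum) ∧ produce_sum_alt (pvRaiseWitness_produce_sum) = pvRaiseWitnessOut_produce_sum)

-- ===== LEMMAS AND PROOFS =====
theorem goA_eq_goB (l : List Char) (hne : l ≠ []) (hev : l.length % 2 = 0) :
    goA l = goB l := by
  rw [goA, goB, dif_neg hne, dif_neg hne, if_pos hev, pairB_eq_pairA]
  show (if (pairA l).length % 2 ≠ 0 then pairA l else goA (pairA l)) = goB (pairA l)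
  have hlen := pairA_length l
  have hpos : 0 < l.length := List.length_pos_iff.mpr hne
  have hret : pairA l ≠ [] := by
    intro hh; rw [hh] at hlen; simp at hlen; omega
  by_cases hodd : (pairA l).length % 2 = 0
  · rw [if_neg (by omega)]
    exact goA_eq_goB (pairA l) hret hodd
  · rw [if_pos (by omega), goB, dif_neg hret, if_neg hodd]
termination_by l.length
decreasing_by
  have h1 := pairA_length l
  omega

-- ===== VERDICT (by name: the statement is the Claim_ definition above) =====
theorem produce_sum_spec : Claim_equal_produce_sum := by
  intro s _ hpre
  obtain ⟨h1, h2⟩ := hpre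
  have hlt : s.length = s.toList.length := Eq.symm String.length_toList
  unfold Spec_produce_sum produce_sum produce_sum_alt
  have hne : s.toList ≠ [] := by
    intro hh; rw [hh] at hlt; simp only [List.length_nil] at hlt; omega
  have hev : s.toList.length % 2 = 0 := by omega
  rw [goA_eq_goB s.toList hne hev]

def produce_sum_raises : Claim_raises_produce_sum := by
  unfold Claim_raises_produce_sum
  refine ⟨?_, by decide, by decide, ?_⟩
  · intro s _ hr hp
    unfold Raises_produce_sum at hr
    unfold Pre_produce_sum at hp
    omega
  · show String.mk (goB ("abc" : String).toList) = "abc"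
    have h1 : ("abc" : String).toList = ['a','b','c'] := by decide
    have h2 : goB ['a','b','c'] = ['a','b','c'] := by rw [goB]; norm_num
    rw [h1, h2]; decide
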